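-- pv_equiv track=rewrite | github.com/sm010422/coding_test | programmers/lessons_134240.py | solution
-- ===== SOURCE A (Python) =====
-- def solution(food):
--     h_many = []
--     result_list = []
--     real_ = []
--
--     for i in range(1, len(food)):
--         h_many.append(food[i] // 2)
--
--     for i in range(len(h_many)):
--         for j in range(h_many[i]):
--             result_list.append(i + 1)
--             real_.append(i + 1)
--
--     real_.reverse()
--     result_list.append(0)
--
--     for i in real_:
--         result_list.append(i)
--
--     answer = "".join(map(str, result_list))
--
--     return answer
-- ===== SOURCE B (Python) =====
-- def solution(food):
--     n = len(food)
--     if n == 0: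
--         return "0"
--     parts = [""] * (2 * n - 1)
--     parts[n - 1] = "0"
--     for i in range(1, n):
--         block = str(i) * (food[i] // 2)
--         parts[i - 1] = block
--         parts[2 * n - 1 - i] = block
--     return "".join(parts)
-- ===== Notes on version B (the rewrite author's own statement) =====
-- stated objective: alternative
-- what changed: B preallocates a fixed-size piece array of 2n-1 slots with '0' at the centre and fills mirror-index pairs (i-1 and 2n-1-i) with each digit block by direct index assignment, then joins once - no counts list, no sequential per-character appends and no list reversal as in A.
import Mathlib
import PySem

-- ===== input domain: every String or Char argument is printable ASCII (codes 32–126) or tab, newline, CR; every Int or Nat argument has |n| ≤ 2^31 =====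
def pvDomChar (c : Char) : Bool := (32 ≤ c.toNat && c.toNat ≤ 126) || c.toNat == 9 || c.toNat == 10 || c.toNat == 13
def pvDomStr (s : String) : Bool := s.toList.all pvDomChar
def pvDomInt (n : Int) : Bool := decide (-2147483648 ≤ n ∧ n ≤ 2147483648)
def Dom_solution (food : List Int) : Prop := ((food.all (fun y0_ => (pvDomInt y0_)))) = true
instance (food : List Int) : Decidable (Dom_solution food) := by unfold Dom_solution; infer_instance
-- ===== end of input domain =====

-- B preallocates 2n-1 piece slots with "0" at the centre and fills mirror-index pairs by
-- direct assignment, joining once: no counts list, no per-character appends, no reversal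
-- (objective: alternative).

-- ===== PORT A =====
-- indices produced by range(...) are always in range, so pyGetD's default 0 is never used
def solution (food : List Int) : String :=
  let h_many : List Int :=
    (PySem.List.pyRange 1 (food.length : Int) 1).foldl
      (fun acc i => acc ++ [PySem.Int.floordiv (PySem.List.pyGetD food i 0) 2]) []
  let rr : List Int × List Int :=
    (PySem.List.pyRange 0 (h_many.length : Int) 1).foldl
      (fun (p : List Int × List Int) i =>
        (PySem.List.pyRange 0 (PySem.List.pyGetD h_many i 0) 1).foldl
          (fun (q : List Int × List Int) _ => (q.1 ++ [i + 1], q.2 ++ [i + 1])) p)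
      ([], [])
  let real_ : List Int := rr.2.reverse
  let result1 : List Int := rr.1 ++ [0]
  let result2 : List Int := real_.foldl (fun acc i => acc ++ [i]) result1
  PySem.Str.join "" (result2.map PySem.Int.toStr)

-- ===== PORT B =====
-- str(i) * k  (Python string repetition)
def strMul (s : String) (k : Int) : String := String.ofList (PySem.List.pyRepeat s.toList k)

def solution_alt (food : List Int) : String :=
  let n : Int := (food.length : Int)
  if n = 0 then "0" else
    let parts0 : List String :=
      PySem.List.pySetD (PySem.List.pyRepeat [""] (2 * n - 1)) (n - 1) "0"
    let parts : List String :=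
      (PySem.List.pyRange 1 n 1).foldl
        (fun parts i =>
          let block := strMul (PySem.Int.toStr i)
            (PySem.Int.floordiv (PySem.List.pyGetD food i 0) 2)
          PySem.List.pySetD (PySem.List.pySetD parts (i - 1) block) (2 * n - 1 - i) block)
        parts0
    PySem.Str.join "" parts

-- ===== PRECONDITION & SPEC =====
def Spec_solution (food : List Int) (out : String) : Prop := out = solution_alt food
instance (food : List Int) (out : String) : Decidable (Spec_solution food out) := by unfold Spec_solution; infer_instance

-- ===== CLAIM (what is proved, stated in full; the proofs are below) =====
def Claim_equal_solution : Prop := ∀ (food : List Int), Dom_solution food → Spec_solution food (solution food)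

-- ===== LEMMAS AND PROOFS =====

-- the half-count of food[i] (as an Int) and the common "half" block list both programs realise
def gHalf (food : List Int) (i : Int) : Int := PySem.Int.floordiv (PySem.List.pyGetD food i 0) 2

def flatL (food : List Int) : List Int :=
  (PySem.List.pyRange 1 (food.length : Int) 1).flatMap
    (fun i => List.replicate (gHalf food i).toNat i)

-- "".join on lists of chars is flatten
theorem chars_join_nil (css : List (List Char)) : PySem.Chars.join [] css = css.flatten := by
  induction css with
  | nil => rfl
  | cons c cs ih =>
      cases cs with
      | nil => simp [PySem.Chars.join, List.intercalate]
      | cons d ds =>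
        simpa [PySem.Chars.join, List.intercalate, List.intersperse] using
          congrArg (c ++ ·) (by simpa [PySem.Chars.join, List.intercalate] using ih)

-- the inner 'for j in range(h)' loop of A appends h copies of v to both lists
theorem inner_loop (v : Int) (l : List Int) (p : List Int × List Int) :
    l.foldl (fun (q : List Int × List Int) _ => (q.1 ++ [v], q.2 ++ [v])) p
      = (p.1 ++ List.replicate l.length v, p.2 ++ List.replicate l.length v) := by
  induction l generalizing p with
  | nil => simp
  | cons x xs ih =>
      simp only [List.foldl_cons, ih, List.length_cons]
      simp [List.replicate_succ, List.append_assoc]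

-- the outer loop of A builds the same flatMap in both components
theorem outer_loop (g : Int → List Int) (l : List Int) (a b : List Int) :
    l.foldl (fun (p : List Int × List Int) i => (p.1 ++ g i, p.2 ++ g i)) (a, b)
      = (a ++ l.flatMap g, b ++ l.flatMap g) := by
  induction l generalizing a b with
  | nil => simp
  | cons x xs ih => simp [ih]

theorem reverse_flatMap_replicate (f : Int → Nat) (l : List Int) :
    (l.flatMap (fun i => List.replicate (f i) i)).reverse
      = l.reverse.flatMap (fun i => List.replicate (f i) i) := by
  induction l with
  | nil => rfl
  | cons x xs ih => simp [ih]

-- str over a flatMap of replicates, flattened = flatten of the repeated digit strings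
theorem map_toChars_flatten (l : List Int) (g : Int → Int) :
    ((l.flatMap (fun i => List.replicate (g i).toNat i)).map PySem.Int.toChars).flatten
      = (l.map (fun i => PySem.List.pyRepeat (PySem.Int.toChars i) (g i))).flatten := by
  induction l with
  | nil => rfl
  | cons x xs ih =>
      simp only [List.flatMap_cons, List.map_append, List.flatten_append, ih, List.map_cons,
        List.flatten_cons]
      congr 1
      simp [PySem.List.pyRepeat, List.map_replicate]

-- generic set-in-append lemmas for the fill
theorem set_at_len_add {α : Type} (xs ys : List α) (m : Nat) (v : α) :
    (xs ++ ys).set (xs.length + m) v = xs ++ ys.set m v := by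
  rw [List.set_append_right _ _ (Nat.le_add_right _ _), Nat.add_sub_cancel_left]

theorem rep_comm {α : Type} (z : α) (k : Nat) (t : List α) :
    z :: (List.replicate k z ++ t) = List.replicate k z ++ z :: t := by
  rw [← List.cons_append, ← List.replicate_succ, List.replicate_succ']
  simp

-- B's loop: filling the mirror-index pairs of a preallocated buffer from the outside in
-- produces the blocks in order, the centre, and the blocks in reverse order
theorem fill_core {α : Type} (z c : α) :
    ∀ (k : Nat) (b : Nat → α) (asc desc : List α),
    (List.range k).foldl
      (fun st j => (st.set (asc.length + j) (b j)).set (asc.length + 2*k - j) (b j))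
      (asc ++ (List.replicate k z ++ [c] ++ List.replicate k z ++ desc))
    = asc ++ ((List.range k).map b ++ [c] ++ ((List.range k).reverse.map b ++ desc)) := by
  intro k
  induction k with
  | zero => intro b asc desc; simp
  | succ k ih =>
      intro b asc desc
      rw [List.range_succ_eq_map, List.foldl_cons, List.foldl_map]
      have hinit :
          ((asc ++ (List.replicate (k+1) z ++ [c] ++ List.replicate (k+1) z ++ desc)).set
              (asc.length + 0) (b 0)).set (asc.length + 2*(k+1) - 0) (b 0)
          = (asc ++ [b 0]) ++ (List.replicate k z ++ [c] ++ List.replicate k z ++ (b 0 :: desc)) := by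
        rw [show List.replicate (k+1) z ++ [c] ++ List.replicate (k+1) z ++ desc
              = z :: (List.replicate k z ++ [c] ++ (List.replicate k z ++ [z]) ++ desc) from by
            simp only [List.replicate_succ]
            simp [List.append_assoc, rep_comm]]
        rw [set_at_len_add, List.set_cons_zero]
        rw [Nat.sub_zero]
        rw [show asc ++ b 0 :: (List.replicate k z ++ [c] ++ (List.replicate k z ++ [z]) ++ desc)
              = (asc ++ [b 0]) ++ ((List.replicate k z ++ [c] ++ List.replicate k z) ++ ([z] ++ desc)) from by
            simp [List.append_assoc]]
        rw [show asc.length + 2*(k+1) = (asc ++ [b 0]).length + (2*k+1) from by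
            simp only [List.length_append, List.length_cons, List.length_nil]; omega]
        rw [set_at_len_add]
        rw [show (2*k+1 : Nat) = (List.replicate k z ++ [c] ++ List.replicate k z).length + 0 from by
            simp only [List.length_append, List.length_cons, List.length_nil,
              List.length_replicate]; omega]
        rw [set_at_len_add]
        simp [List.append_assoc]
      rw [hinit]
      have hfun :
          (fun (st : List α) (j : Nat) =>
            (st.set (asc.length + (j+1)) (b (j+1))).set (asc.length + 2*(k+1) - (j+1)) (b (j+1)))
          = (fun (st : List α) (j : Nat) =>
            (st.set ((asc ++ [b 0]).length + j) ((b ∘ Nat.succ) j)).set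
              ((asc ++ [b 0]).length + 2*k - j) ((b ∘ Nat.succ) j)) := by
        funext st j
        have h1 : asc.length + (j+1) = (asc ++ [b 0]).length + j := by
          simp only [List.length_append, List.length_cons, List.length_nil]; omega
        have h2 : asc.length + 2*(k+1) - (j+1) = (asc ++ [b 0]).length + 2*k - j := by
          simp only [List.length_append, List.length_cons, List.length_nil]; omega
        rw [h1, h2]; rfl
      rw [show (fun (st : List α) (j : Nat) =>
            (st.set (asc.length + (j+1)) (b (j+1))).set (asc.length + 2*(k+1) - (j+1)) (b (j+1)))
          = _ from hfun]
      rw [ih (b ∘ Nat.succ) (asc ++ [b 0]) (b 0 :: desc)]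
      simp [Function.comp_def, List.map_map, List.append_assoc]

theorem join_toList (ps : List String) :
    (PySem.Str.join "" ps).toList = (ps.map String.toList).flatten := by
  simp [PySem.Str.join, chars_join_nil]

theorem toList_solution_alt (food : List Int) :
    (solution_alt food).toList
      = ((flatL food).map PySem.Int.toChars).flatten ++ ['0']
          ++ ((flatL food).reverse.map PySem.Int.toChars).flatten := by
  by_cases h0 : (food.length : Int) = 0
  · have hempty : food = [] := by
      cases food with
      | nil => rfl
      | cons x xs => simp at h0; omega
    subst hempty
    simp [solution_alt, flatL, PySem.List.pyRange_one_eq_nil (by omega : (0:Int) ≤ 1)]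
  · have hN1 : 1 ≤ food.length := by
      by_contra h
      exact h0 (by simp [Nat.lt_one_iff.mp (Nat.not_le.mp h)])
    set k := food.length - 1 with hkdef
    set b : Nat → String := fun j => strMul (PySem.Int.toStr (1 + (j : Int)))
      (gHalf food (1 + (j : Int))) with hbdef
    have hrange : PySem.List.pyRange 1 (food.length : Int) 1
        = (List.range k).map (fun j : Nat => 1 + (j : Int)) := by
      rw [PySem.List.pyRange_one]
      rw [show ((food.length : Int) - 1).toNat = k from by omega]
    simp only [solution_alt, if_neg h0]
    have hset0 : PySem.List.pySetD
          (PySem.List.pyRepeat ([""] : List String) (2 * (food.length : Int) - 1))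
          ((food.length : Int) - 1) "0"
        = [] ++ (List.replicate k "" ++ ["0"] ++ List.replicate k "" ++ []) := by
      rw [PySem.List.pyRepeat_singleton,
          show ((food.length : Int) - 1) = ((k : Nat) : Int) from by omega,
          PySem.List.pySetD_natCast,
          show (2 * (food.length : Int) - 1).toNat = k + (1 + k) from by omega]
      rw [List.replicate_add]
      have hmid : (List.replicate k ("" : String) ++ List.replicate (1+k) "").set k "0"
          = List.replicate k "" ++ (List.replicate (1+k) ("" : String)).set 0 "0" := by
        have h := set_at_len_add (List.replicate k ("" : String))
          (List.replicate (1+k) "") 0 "0"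
        simpa using h
      rw [hmid]
      rw [show List.replicate (1 + k) ("" : String) = "" :: List.replicate k "" from by
          rw [Nat.add_comm]; rfl]
      simp [List.append_assoc]
    rw [hset0, hrange, List.foldl_map]
    have hcongr :
        List.foldl
          (fun (x : List String) (y : Nat) =>
            PySem.List.pySetD
              (PySem.List.pySetD x (1 + (y:Int) - 1)
                (strMul (PySem.Int.toStr (1 + (y:Int)))
                  (PySem.Int.floordiv (PySem.List.pyGetD food (1 + (y:Int)) 0) 2)))
              (2 * (food.length : Int) - 1 - (1 + (y:Int)))
              (strMul (PySem.Int.toStr (1 + (y:Int)))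
                (PySem.Int.floordiv (PySem.List.pyGetD food (1 + (y:Int)) 0) 2)))
          ([] ++ (List.replicate k "" ++ ["0"] ++ List.replicate k "" ++ []))
          (List.range k)
        = List.foldl
            (fun (st : List String) (j : Nat) =>
              (st.set (([] : List String).length + j) (b j)).set
                (([] : List String).length + 2*k - j) (b j))
            ([] ++ (List.replicate k "" ++ ["0"] ++ List.replicate k "" ++ []))
            (List.range k) := by
      apply PySem.List.foldl_congr_mem
      intro acc j hj
      simp only [List.mem_range] at hj
      have hidx1 : (1 + (j:Int)) - 1 = ((j : Nat) : Int) := by omega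
      have hidx2 : (2 * (food.length : Int) - 1 - (1 + (j:Int)))
          = (((2*k - j : Nat)) : Int) := by omega
      simp only [hidx1, hidx2, PySem.List.pySetD_natCast]
      simp only [List.length_nil, Nat.zero_add, hbdef, gHalf]
    rw [hcongr]
    rw [fill_core "" "0" k b [] []]
    rw [join_toList]
    have hblk : ∀ j : Nat, (b j).toList
        = PySem.List.pyRepeat (PySem.Int.toChars (1 + (j:Int))) (gHalf food (1 + (j:Int))) := by
      intro j
      simp [hbdef, strMul, PySem.Int.toList_toStr]
    have e1 : ((flatL food).map PySem.Int.toChars).flatten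
        = (List.range k).flatMap (fun j => (b j).toList) := by
      have h1 := map_toChars_flatten (PySem.List.pyRange 1 (food.length : Int) 1)
        (fun i => PySem.Int.floordiv (PySem.List.pyGetD food i 0) 2)
      simp only [flatL, gHalf] at h1 ⊢
      rw [h1, hrange, List.map_map]
      simp [List.flatMap_def, hblk, gHalf, Function.comp_def]
    have e2 : ((flatL food).reverse.map PySem.Int.toChars).flatten
        = (List.range k).reverse.flatMap (fun j => (b j).toList) := by
      have hrev := reverse_flatMap_replicate
        (fun i => (PySem.Int.floordiv (PySem.List.pyGetD food i 0) 2).toNat)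
        (PySem.List.pyRange 1 (food.length : Int) 1)
      have h2 := map_toChars_flatten (PySem.List.pyRange 1 (food.length : Int) 1).reverse
        (fun i => PySem.Int.floordiv (PySem.List.pyGetD food i 0) 2)
      simp only [flatL, gHalf] at hrev ⊢
      rw [hrev, h2, hrange, List.map_reverse, List.map_map]
      simp [List.flatMap_def, hblk, gHalf, Function.comp_def]
    rw [e1, e2]
    simp [List.map_append, List.flatten_append, List.map_map, List.flatMap_def,
      Function.comp_def]

-- A's index-driven nested loops produce exactly flatL in both components
theorem rr_eq (food : List Int) :
    (PySem.List.pyRange 0 (((PySem.List.pyRange 1 (food.length : Int) 1).map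
        (gHalf food)).length : Int) 1).foldl
      (fun (p : List Int × List Int) i =>
        (PySem.List.pyRange 0 (PySem.List.pyGetD
            ((PySem.List.pyRange 1 (food.length : Int) 1).map (gHalf food)) i 0) 1).foldl
          (fun (q : List Int × List Int) _ => (q.1 ++ [i + 1], q.2 ++ [i + 1])) p)
      ([], [])
    = (flatL food, flatL food) := by
  set R := PySem.List.pyRange 1 (food.length : Int) 1 with hR
  set hs := R.map (gHalf food) with hhs
  have hbody : ∀ (p : List Int × List Int) (i : Int),
      (PySem.List.pyRange 0 (PySem.List.pyGetD hs i 0) 1).foldl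
        (fun (q : List Int × List Int) _ => (q.1 ++ [i + 1], q.2 ++ [i + 1])) p
      = (p.1 ++ List.replicate (PySem.List.pyGetD hs i 0).toNat (i + 1),
         p.2 ++ List.replicate (PySem.List.pyGetD hs i 0).toNat (i + 1)) := by
    intro p i
    rw [inner_loop]
    simp [PySem.List.length_pyRange_one]
  calc (PySem.List.pyRange 0 (hs.length : Int) 1).foldl
        (fun (p : List Int × List Int) i =>
          (PySem.List.pyRange 0 (PySem.List.pyGetD hs i 0) 1).foldl
            (fun (q : List Int × List Int) _ => (q.1 ++ [i + 1], q.2 ++ [i + 1])) p)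
        ([], [])
      = (PySem.List.pyRange 0 (hs.length : Int) 1).foldl
          (fun (p : List Int × List Int) i =>
            (p.1 ++ List.replicate (PySem.List.pyGetD hs i 0).toNat (i + 1),
             p.2 ++ List.replicate (PySem.List.pyGetD hs i 0).toNat (i + 1))) ([], []) := by
        congr 1; funext p i; exact hbody p i
    _ = ([] ++ (PySem.List.pyRange 0 (hs.length : Int) 1).flatMap
          (fun i => List.replicate (PySem.List.pyGetD hs i 0).toNat (i + 1)),
         [] ++ (PySem.List.pyRange 0 (hs.length : Int) 1).flatMap
          (fun i => List.replicate (PySem.List.pyGetD hs i 0).toNat (i + 1))) :=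
        outer_loop _ _ [] []
    _ = (flatL food, flatL food) := by
        have hlen : hs.length = ((food.length : Int) - 1).toNat := by
          simp [hhs, hR, PySem.List.length_pyRange_one]
        have key : (PySem.List.pyRange 0 (hs.length : Int) 1).flatMap
            (fun i => List.replicate (PySem.List.pyGetD hs i 0).toNat (i + 1)) = flatL food := by
          rw [PySem.List.pyRange_zero_nat hs.length, List.flatMap_map, hlen]
          rw [flatL, PySem.List.pyRange_one 1 (food.length : Int), List.flatMap_map]
          simp only [List.flatMap_def]
          congr 1
          apply List.map_congr_left
          intro k hk
          simp only [List.mem_range] at hk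
          have hk' : k < hs.length := by omega
          have hget : PySem.List.pyGetD hs (k : Int) 0 = gHalf food (1 + (k : Int)) := by
            rw [PySem.List.pyGetD_natCast, List.getD_eq_getElem hs 0 hk']
            simp [hhs, hR, PySem.List.getElem_pyRange_one]
          rw [hget]
          have : (k : Int) + 1 = 1 + (k : Int) := by ring
          rw [this]
        rw [key]
        simp

theorem toList_solution (food : List Int) :
    (solution food).toList
      = ((flatL food).map PySem.Int.toChars).flatten ++ ['0']
          ++ ((flatL food).reverse.map PySem.Int.toChars).flatten := by
  show (PySem.Str.join "" _).toList = _
  have hmap := PySem.List.foldl_append_singleton_eq_map (gHalf food)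
    (PySem.List.pyRange 1 (food.length : Int) 1) []
  rw [List.nil_append] at hmap
  rw [show (fun (acc : List Int) (i : Int) =>
        acc ++ [PySem.Int.floordiv (PySem.List.pyGetD food i 0) 2])
      = (fun (acc : List Int) (i : Int) => acc ++ [gHalf food i]) from rfl, hmap]
  rw [rr_eq food]
  rw [PySem.List.foldl_append_singleton]
  simp [PySem.Str.join, chars_join_nil, PySem.Int.toList_toStr, Function.comp_def,
    (by decide : PySem.Int.toChars 0 = ['0'])]

-- ===== VERDICT (by name: the statement is the Claim_ definition above) =====
theorem solution_spec : Claim_equal_solution := by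
  intro food _
  show solution food = solution_alt food
  apply String.toList_inj.mp
  rw [toList_solution, toList_solution_alt]
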